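-- pv_equiv track=rewrite | github.com/Baozpy/Analysis_VLM_memory_decay | MMDU-main/analyze_dialogues.py | infer_image_from_answer
-- ===== SOURCE A (Python) =====
-- from typing import Dict, List, Tuple, Optional
--
-- def infer_image_from_answer(
--     answer: str,
--     image_signatures: Dict[int, List[str]]
-- ) -> Optional[int]:
--     low = answer.lower()
--     best_img = None
--     best_score = 0
--     for img_id, keywords in image_signatures.items():
--         score = 0
--         for kw in keywords:
--             if kw.lower() in low:
--                 score += 1
--         if score > best_score:
--             best_score = score
--             best_img = img_id
--     if best_score == 0:
--         return None
--     return best_img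
-- ===== SOURCE B (Python) =====
-- from typing import Dict, List, Tuple, Optional
--
-- def infer_image_from_answer(
--     answer: str,
--     image_signatures: Dict[int, List[str]]
-- ) -> Optional[int]:
--     low = answer.lower()
--     items = list(image_signatures.items())
--     # inverted index: lowered keyword -> positions of the images carrying it (one entry per occurrence)
--     index = {}
--     for i, (_img, kws) in enumerate(items):
--         for kw in kws:
--             k = kw.lower()
--             index[k] = index.get(k, []) + [i]
--     # each DISTINCT lowered keyword is scanned for in the answer exactly once,
--     # and its hit is distributed to every image position that carries it
--     scores = [0] * len(items)
--     for k, occ in index.items():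
--         if k in low:
--             for i in occ:
--                 scores[i] += 1
--     best, best_s = None, 0
--     for (img_id, _), s in zip(items, scores):
--         if s > best_s:
--             best, best_s = img_id, s
--     return best
-- ===== Notes on version B (the rewrite author's own statement) =====
-- stated objective: alternative
-- what changed: B inverts A's traversal: it builds an inverted index from lowered keyword to the image positions carrying it, tests each DISTINCT keyword against the answer exactly once and distributes its hits into a per-position score array, then picks the first strict maximum by zipping images with their scores, instead of A's per-image inner loop that re-scans the answer for every keyword occurrence.
import Mathlib
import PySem

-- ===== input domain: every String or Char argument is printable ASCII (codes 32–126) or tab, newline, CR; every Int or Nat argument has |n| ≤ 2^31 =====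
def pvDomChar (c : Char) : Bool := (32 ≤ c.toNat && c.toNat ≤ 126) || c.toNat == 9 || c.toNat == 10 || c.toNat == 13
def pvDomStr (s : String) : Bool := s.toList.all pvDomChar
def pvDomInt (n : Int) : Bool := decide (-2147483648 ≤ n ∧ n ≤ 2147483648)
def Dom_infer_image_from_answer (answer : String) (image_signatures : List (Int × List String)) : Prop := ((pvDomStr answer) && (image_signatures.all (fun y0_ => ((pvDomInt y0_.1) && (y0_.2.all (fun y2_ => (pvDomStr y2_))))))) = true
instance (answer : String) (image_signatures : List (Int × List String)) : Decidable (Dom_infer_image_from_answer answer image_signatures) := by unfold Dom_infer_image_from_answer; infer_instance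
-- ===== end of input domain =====

-- B replaces A's per-image substring scans by an inverted index (lowered keyword -> image
-- positions): each distinct keyword is tested against the answer once and its hits are
-- distributed to per-position scores, then the first strict maximum is selected
-- (objective: alternative; same return value everywhere).


-- ===== PORT A =====
def infer_image_from_answer (answer : String) (image_signatures : List (Int × List String)) : Option Int :=
  let low := PySem.Str.lower answer
  let r := image_signatures.foldl
    (fun (st : Option Int × Int) p =>
      let score := p.2.foldl (fun (s : Int) kw => if PySem.Str.isIn (PySem.Str.lower kw) low then s + 1 else s) 0
      if score > st.2 then (some p.1, score) else st)
    (none, 0)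
  if r.2 = 0 then none else r.1

-- ===== PORT B =====
-- 'scores[i] += 1'; i is a 0-based enumerate index, always nonnegative and in range,
-- so Int.toNat / List.set are exact here
def pvBump (sc : List Int) (i : Int) : List Int := sc.set i.toNat (sc.getD i.toNat 0 + 1)

def infer_image_from_answer_alt (answer : String) (image_signatures : List (Int × List String)) : Option Int :=
  let low := PySem.Str.lower answer
  -- 'index[k] = index.get(k, []) + [i]' over 'for i, (_img, kws) in enumerate(items)'
  let index : PySem.Dict String (List Int) :=
    (PySem.List.enumerate image_signatures 0).foldl
      (fun d q => q.2.2.foldl (fun d kw => d.modify (PySem.Str.lower kw) [] (fun occ => occ ++ [q.1])) d)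
      PySem.Dict.empty
  let scores0 : List Int := List.replicate image_signatures.length 0
  let scores := index.items.foldl
    (fun sc (e : String × List Int) => if PySem.Str.isIn e.1 low then e.2.foldl pvBump sc else sc) scores0
  ((image_signatures.zip scores).foldl
    (fun (st : Option Int × Int) q => if q.2 > st.2 then (some q.1.1, q.2) else st)
    (none, 0)).1

-- ===== PRECONDITION & SPEC =====
def Spec_infer_image_from_answer (answer : String) (image_signatures : List (Int × List String)) (out : Option Int) : Prop := out = infer_image_from_answer_alt answer image_signatures
instance (answer : String) (image_signatures : List (Int × List String)) (out : Option Int) : Decidable (Spec_infer_image_from_answer answer image_signatures out) := by unfold Spec_infer_image_from_answer; infer_instance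

-- ===== CLAIM (what is proved, stated in full; the proofs are below) =====
def Claim_equal_infer_image_from_answer : Prop := ∀ (answer : String) (image_signatures : List (Int × List String)), Dom_infer_image_from_answer answer image_signatures → Spec_infer_image_from_answer answer image_signatures (infer_image_from_answer answer image_signatures)

-- ===== LEMMAS AND PROOFS =====

-- A's per-keyword hit test
def pvPred (low : String) (kw : String) : Bool := PySem.Str.isIn (PySem.Str.lower kw) low

-- the flattened stream of (lowered keyword, image position) pairs B's index is built from
def pvL (sigs : List (Int × List String)) (s : Int) : List (String × Int) :=
  (PySem.List.enumerate sigs s).flatMap (fun q => q.2.2.map (fun kw => (PySem.Str.lower kw, q.1)))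

-- one bump changes exactly cell i (for nonnegative i; other cells and the length are untouched)
lemma pvBump_getD (sc : List Int) (i : Int) (j : Nat) (hj : j < sc.length) (hi : 0 ≤ i) :
    (pvBump sc i).getD j 0 = sc.getD j 0 + (if i = (j : Int) then 1 else 0) := by
  unfold pvBump
  by_cases h : i = (j : Int)
  · subst h
    rw [if_pos rfl]
    have h0 : ((j:Int)).toNat = j := by omega
    rw [h0]
    rw [List.getD_eq_getElem _ _ (show j < (sc.set j (sc.getD j 0 + 1)).length by simpa using hj)]
    simp [List.getElem_set_self, List.getD_eq_getElem _ _ hj]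
  · rw [if_neg h]
    have hne : i.toNat ≠ j := by omega
    rw [List.getD_eq_getElem _ _ (by simpa using hj), List.getD_eq_getElem _ _ hj,
        List.getElem_set_ne hne]
    simp

lemma pvOcc_fold (occ : List Int) : ∀ (sc : List Int) (j : Nat), j < sc.length → (∀ i ∈ occ, 0 ≤ i) →
    (occ.foldl pvBump sc).length = sc.length ∧
    (occ.foldl pvBump sc).getD j 0 = sc.getD j 0 + (occ.count (j : Int) : Int) := by
  induction occ with
  | nil => intro sc j hj _; simp
  | cons i t ih =>
      intro sc j hj hnn
      have hi : 0 ≤ i := hnn i (List.mem_cons_self ..)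
      have hlen : (pvBump sc i).length = sc.length := by simp [pvBump]
      obtain ⟨hL, hG⟩ := ih (pvBump sc i) j (hlen ▸ hj) (fun x hx => hnn x (List.mem_cons_of_mem _ hx))
      refine ⟨by simpa [hlen] using hL, ?_⟩
      simp only [List.foldl_cons] at *
      rw [hG, pvBump_getD sc i j hj hi, List.count_cons]
      have : (i == (j:Int)) = decide (i = (j:Int)) := by rfl
      by_cases h : i = (j:Int) <;> simp [h] <;> push_cast <;> ring

lemma pvPhase2 (low : String) (E : List (String × List Int)) : ∀ (sc : List Int) (j : Nat),
    j < sc.length → (∀ e ∈ E, ∀ i ∈ e.2, 0 ≤ i) →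
    (E.foldl (fun sc (e : String × List Int) => if PySem.Str.isIn e.1 low then e.2.foldl pvBump sc else sc) sc).length = sc.length ∧
    (E.foldl (fun sc (e : String × List Int) => if PySem.Str.isIn e.1 low then e.2.foldl pvBump sc else sc) sc).getD j 0
      = sc.getD j 0 + ((E.map (fun e => if PySem.Str.isIn e.1 low then e.2.count (j : Int) else 0)).sum : Int) := by
  induction E with
  | nil => intro sc j hj _; simp
  | cons e t ih =>
      intro sc j hj hnn
      simp only [List.foldl_cons, List.map_cons, List.sum_cons]
      by_cases h : PySem.Str.isIn e.1 low
      · rw [if_pos h, if_pos h]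
        obtain ⟨hL1, hG1⟩ := pvOcc_fold e.2 sc j hj (hnn e (List.mem_cons_self ..))
        obtain ⟨hL2, hG2⟩ := ih (e.2.foldl pvBump sc) j (hL1 ▸ hj) (fun x hx => hnn x (List.mem_cons_of_mem _ hx))
        refine ⟨by rw [hL2, hL1], ?_⟩
        rw [hG2, hG1]
        push_cast
        ring
      · rw [if_neg h, if_neg h]
        obtain ⟨hL, hG⟩ := ih sc j hj (fun x hx => hnn x (List.mem_cons_of_mem _ hx))
        exact ⟨hL, by rw [hG]; omega⟩

lemma pvSum_ite (a : String) (c : Nat) : ∀ (K : List String), K.Nodup → a ∈ K →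
    (K.map (fun k => if a = k then c else 0)).sum = c := by
  intro K
  induction K with
  | nil => intro _ h; simp at h
  | cons k t ih =>
      intro hnd hmem
      rcases List.mem_cons.mp hmem with h | h
      · subst h
        have : ∀ x ∈ t, (if a = x then c else 0) = 0 := by
          intro x hx
          have : a ≠ x := fun he => (List.nodup_cons.mp hnd).1 (he ▸ hx)
          simp [this]
        simp [List.map_congr_left this]
      · have hne : a ≠ k := fun he => (List.nodup_cons.mp hnd).1 (he ▸ h)
        simp only [List.map_cons, List.sum_cons, if_neg hne, Nat.zero_add]
        exact ih (List.nodup_cons.mp hnd).2 h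

lemma pvKeysum (low : String) (K : List String) (j : Int)
    (hnd : K.Nodup) : ∀ (L : List (String × Int)), (∀ p ∈ L, p.1 ∈ K) →
    (K.map (fun k => if PySem.Str.isIn k low then ((L.filter (fun p => p.1 == k)).map (fun p => p.2)).count j else 0)).sum
      = L.countP (fun p => PySem.Str.isIn p.1 low && p.2 == j) := by
  intro L
  induction L with
  | nil => intro _; simp
  | cons p t ih =>
      intro hmem
      have hp : p.1 ∈ K := hmem p (List.mem_cons_self ..)
      have step : ∀ k ∈ K,
          (if PySem.Str.isIn k low then (((p :: t).filter (fun q => q.1 == k)).map (fun q => q.2)).count j else 0)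
          = (if PySem.Str.isIn k low then ((t.filter (fun q => q.1 == k)).map (fun q => q.2)).count j else 0)
            + (if p.1 = k then (if PySem.Str.isIn p.1 low && p.2 == j then 1 else 0) else 0) := by
        intro k _
        by_cases hk : p.1 = k
        · subst hk
          by_cases hl : PySem.Str.isIn p.1 low
          · simp only [List.filter_cons, beq_self_eq_true, if_true, hl, List.map_cons, List.count_cons]
            by_cases hj2 : p.2 == j <;> simp [hj2]
          · rw [if_neg hl, if_neg hl]
            simp only [PySem.Str.isIn] at hl
            simp [Bool.and_eq_true, hl]
        · have : (p.1 == k) = false := by simp [hk]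
          simp [List.filter_cons, this, hk]
      rw [List.map_congr_left step, List.sum_map_add]
      rw [ih (fun q hq => hmem q (List.mem_cons_of_mem _ hq))]
      rw [pvSum_ite p.1 _ K hnd hp]
      rw [List.countP_cons]

lemma pvL_snd_nonneg (sigs : List (Int × List String)) (s : Int) (p : String × Int)
    (hp : p ∈ pvL sigs s) : s ≤ p.2 := by
  unfold pvL at hp
  obtain ⟨q, hq, hpq⟩ := List.mem_flatMap.mp hp
  obtain ⟨kw, _, rfl⟩ := List.mem_map.mp hpq
  have : q.1 ∈ (PySem.List.enumerate sigs s).map (fun x => x.1) := List.mem_map_of_mem hq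
  rw [PySem.List.map_fst_enumerate] at this
  exact (PySem.List.mem_pyRange_one.mp this).1

lemma pvFlatCount (low : String) (sigs : List (Int × List String)) : ∀ (s j : Int),
    (j < s → (pvL sigs s).countP (fun p => PySem.Str.isIn p.1 low && p.2 == j) = 0) ∧
    (s ≤ j → (pvL sigs s).countP (fun p => PySem.Str.isIn p.1 low && p.2 == j)
      = ((sigs[(j - s).toNat]?).map (fun p => p.2.countP (pvPred low))).getD 0) := by
  induction sigs with
  | nil => intro s j; constructor <;> intro _ <;> simp [pvL, PySem.List.enumerate]
  | cons x xs ih =>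
      intro s j
      have hcons : pvL (x :: xs) s
          = x.2.map (fun kw => (PySem.Str.lower kw, s)) ++ pvL xs (s + 1) := by
        unfold pvL
        rw [PySem.List.enumerate_cons, List.flatMap_cons]
      have hhead : (x.2.map (fun kw => (PySem.Str.lower kw, s))).countP (fun p => PySem.Str.isIn p.1 low && p.2 == j)
          = if s = j then x.2.countP (pvPred low) else 0 := by
        rw [List.countP_map]
        by_cases hsj : s = j
        · subst hsj
          rw [if_pos rfl]
          apply List.countP_congr
          intro kw _
          simp [pvPred, Function.comp]
        · rw [if_neg hsj]
          have : ∀ kw ∈ x.2, ((fun p => PySem.Str.isIn p.1 low && p.2 == j) ∘ (fun kw => (PySem.Str.lower kw, s))) kw = false := by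
            intro kw _
            simp [Function.comp, hsj]
          rw [List.countP_congr (fun a ha => by rw [this a ha])]
          simp
      constructor
      · intro hj
        rw [hcons, List.countP_append, hhead, if_neg (by omega)]
        rw [(ih (s+1) j).1 (by omega)]
      · intro hj
        rw [hcons, List.countP_append, hhead]
        by_cases hsj : s = j
        · subst hsj
          rw [if_pos rfl, (ih (s+1) s).1 (by omega)]
          simp
        · rw [if_neg hsj, (ih (s+1) j).2 (by omega)]
          have h1 : (j - s).toNat = (j - (s+1)).toNat + 1 := by omega
          rw [h1]
          simp

lemma pvSel (f : (Int × List String) → Int) (hf : ∀ p, 0 ≤ f p) (l : List (Int × List String)) :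
    ∀ (st : Option Int × Int), 0 ≤ st.2 → (st.2 = 0 → st.1 = none) →
    0 ≤ (l.foldl (fun (st : Option Int × Int) p => if f p > st.2 then (some p.1, f p) else st) st).2 ∧
    ((l.foldl (fun (st : Option Int × Int) p => if f p > st.2 then (some p.1, f p) else st) st).2 = 0 →
     (l.foldl (fun (st : Option Int × Int) p => if f p > st.2 then (some p.1, f p) else st) st).1 = none) := by
  induction l with
  | nil => intro st h0 h1; exact ⟨h0, h1⟩
  | cons p t ih =>
      intro st h0 h1
      simp only [List.foldl_cons]
      by_cases h : f p > st.2
      · rw [if_pos h]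
        exact ih (some p.1, f p) (hf p) (fun he => absurd he (by have := hf p; omega))
      · rw [if_neg h]
        exact ih st h0 h1

-- ===== VERDICT (by name: the statement is the Claim_ definition above) =====
theorem infer_image_from_answer_spec : Claim_equal_infer_image_from_answer := by
  intro answer sigs _
  unfold Spec_infer_image_from_answer
  unfold infer_image_from_answer infer_image_from_answer_alt
  dsimp only
  set low := PySem.Str.lower answer with hlow
  set f : (Int × List String) → Int := fun p => ((p.2.countP (pvPred low) : Nat) : Int) with hf
  -- ===== A side =====
  have hA : (sigs.foldl
      (fun (st : Option Int × Int) p =>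
        let score := p.2.foldl (fun (s : Int) kw => if PySem.Str.isIn (PySem.Str.lower kw) low then s + 1 else s) 0
        if score > st.2 then (some p.1, score) else st) (none, 0))
      = sigs.foldl (fun (st : Option Int × Int) p => if f p > st.2 then (some p.1, f p) else st) (none, 0) := by
    apply PySem.List.foldl_congr_mem
    intro st p _
    simp only [PySem.List.foldl_if_add_one, zero_add]
    rfl
  -- ===== B side: the index =====
  set idx := (PySem.List.enumerate sigs 0).foldl
      (fun d q => q.2.2.foldl (fun d kw => d.modify (PySem.Str.lower kw) [] (fun occ => occ ++ [q.1])) d)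
      PySem.Dict.empty with hidx0
  have hidx : idx = (pvL sigs 0).foldl (fun d p => d.modify p.1 [] (fun occ => occ ++ [p.2])) PySem.Dict.empty := by
    rw [hidx0, pvL, List.foldl_flatMap]
    simp only [List.foldl_map]
  have hkeys : idx.keys = PySem.Set.ofList ((pvL sigs 0).map (fun p => p.1)) := by
    rw [hidx, PySem.Dict.keys_foldl_modify_key (pvL sigs 0) (fun p => p.1) [] (fun d p => fun occ => occ ++ [p.2]),
        PySem.Dict.keys_empty, PySem.Set.ofList_eq_foldl]
    rfl
  have hnodup : idx.keys.Nodup := by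
    rw [hidx]
    exact PySem.Dict.nodup_keys_foldl_modify_key _ _ _ _ _ PySem.Dict.nodup_keys_empty
  have hgetD : ∀ k, idx.getD k [] = ((pvL sigs 0).filter (fun p => p.1 == k)).map (fun p => p.2) := by
    intro k
    rw [hidx, PySem.Dict.getD_foldl_modify_append, PySem.Dict.getD_empty, List.nil_append]
  have hitems : idx.items = idx.keys.map (fun k => (k, idx.getD k [])) := PySem.Dict.items_eq_map_keys idx hnodup []
  have hEnn : ∀ e ∈ idx.items, ∀ i ∈ e.2, 0 ≤ i := by
    intro e he i hi
    rw [hitems] at he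
    obtain ⟨k, _, rfl⟩ := List.mem_map.mp he
    rw [hgetD k] at hi
    obtain ⟨p, hp, rfl⟩ := List.mem_map.mp hi
    exact pvL_snd_nonneg sigs 0 p (List.mem_of_mem_filter hp)
  -- ===== B side: the scores =====
  set scores := idx.items.foldl
      (fun sc (e : String × List Int) => if PySem.Str.isIn e.1 low then e.2.foldl pvBump sc else sc)
      (List.replicate sigs.length (0:Int)) with hscores0
  have hslen : scores.length = sigs.length := by
    rcases Nat.eq_zero_or_pos sigs.length with h0 | hpos
    · rw [hscores0]
      have : sigs = [] := List.eq_nil_of_length_eq_zero h0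
      subst this
      have hidxnil : idx.items = [] := by
        rw [hitems, hkeys]
        simp [pvL, PySem.List.enumerate]
      rw [hidxnil]
      simp
    · exact (pvPhase2 low idx.items (List.replicate sigs.length 0) 0 (by simpa using hpos) hEnn).1.trans (by simp)
  have hsval : ∀ (j : Nat) (hj : j < sigs.length), scores.getD j 0 = f sigs[j] := by
    intro j hj
    rw [hscores0]
    obtain ⟨-, hG⟩ := pvPhase2 low idx.items (List.replicate sigs.length 0) j (by simpa using hj) hEnn
    rw [hG]
    have h0 : (List.replicate sigs.length (0:Int)).getD j 0 = 0 := by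
      rw [List.getD_eq_getElem _ _ (by simpa using hj)]
      simp
    rw [h0, zero_add]
    have hsumN : (idx.items.map (fun e => if PySem.Str.isIn e.1 low then e.2.count (j : Int) else 0)).sum
        = (pvL sigs 0).countP (fun p => PySem.Str.isIn p.1 low && p.2 == (j : Int)) := by
      rw [hitems, List.map_map]
      have hcong : ∀ k ∈ idx.keys,
          ((fun e => if PySem.Str.isIn e.1 low then e.2.count (j : Int) else 0) ∘ (fun k => (k, idx.getD k []))) k
          = (fun k => if PySem.Str.isIn k low then (((pvL sigs 0).filter (fun p => p.1 == k)).map (fun p => p.2)).count (j : Int) else 0) k := by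
        intro k _
        simp only [Function.comp, hgetD k]
      rw [List.map_congr_left hcong]
      apply pvKeysum low idx.keys (j : Int) hnodup (pvL sigs 0)
      intro p hp
      rw [hkeys, PySem.Set.mem_ofList]
      exact List.mem_map_of_mem hp
    have hsumI : (idx.items.map (fun e => if PySem.Str.isIn e.1 low then (↑(e.2.count (j : Int)) : Int) else 0)).sum
        = (((pvL sigs 0).countP (fun p => PySem.Str.isIn p.1 low && p.2 == (j : Int)) : Nat) : Int) := by
      rw [← hsumN, Nat.cast_list_sum, List.map_map]
      congr 1
      apply List.map_congr_left
      intro e _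
      cases hc : PySem.Chars.isIn e.1.toList low.toList <;>
        simp [Function.comp, PySem.Str.isIn, hc]
    rw [hsumI, (pvFlatCount low sigs 0 (j : Int)).2 (by omega)]
    have : ((j : Int) - 0).toNat = j := by omega
    rw [this, List.getElem?_eq_getElem hj]
    simp [hf]
  have hmap : scores = sigs.map f := by
    apply List.ext_getElem (by rw [hslen, List.length_map])
    intro j hj1 hj2
    rw [← List.getD_eq_getElem scores 0 hj1, hsval j (by rwa [hslen] at hj1)]
    rw [List.getElem_map]
  -- ===== selection =====
  rw [hA, hmap]
  have hzip : sigs.zip (sigs.map f) = sigs.map (fun p => (p, f p)) := by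
    have := @List.zip_map' _ _ _ id f sigs
    rwa [List.map_id] at this
  rw [hzip, List.foldl_map]
  have hnn : ∀ p, 0 ≤ f p := fun p => Int.natCast_nonneg _
  obtain ⟨-, hz⟩ := pvSel f hnn sigs (none, 0) le_rfl (fun _ => rfl)
  by_cases h : (sigs.foldl (fun (st : Option Int × Int) p => if f p > st.2 then (some p.1, f p) else st) (none, 0)).2 = 0
  · rw [if_pos h, hz h]
  · rw [if_neg h]
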